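-- pv_equiv track=rewrite | github.com/rkya/ai_golomb_ruler | submit.py | isValueConsistentFT
-- ===== SOURCE A (Python) =====
-- def isValueConsistentFT(value, assignedVariables, distance):
--     newSetValues = set()
--     for marker in assignedVariables:
--         newDistance = abs(value - marker)
--         # Check for consistency i.e. space between every pair of markers is distinct and markers do not overlap
--         if newDistance in distance or newDistance in newSetValues or newDistance == 0:
--             return False, set()
--         newSetValues.add(newDistance)
--
--     if len(assignedVariables) == 0:
--         if value in distance or value in newSetValues:
--             return False, set()
--         newSetValues.add(value)
--     return True, newSetValues
-- ===== SOURCE B (Python) =====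
-- def isValueConsistentFT(value, assignedVariables, distance):
--     if not assignedVariables:
--         if value in distance:
--             return False, set()
--         return True, {value}
--     banned = set(distance)
--     banned.add(0)
--     ds = [abs(value - m) for m in assignedVariables]
--     if any(d in banned for d in ds):
--         return False, set()
--     srt = sorted(ds)
--     if any(a == b for a, b in zip(srt, srt[1:])):
--         return False, set()
--     return True, set(ds)
-- ===== Notes on version B (the rewrite author's own statement) =====
-- stated objective: alternative
-- what changed: B replaces A's incremental seen-set with early returns by a sort-then-adjacent-scan for duplicate distances plus a single membership pass against a precomputed banned set (set(distance) with 0 added), handling the empty-assignment case up front.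
import Mathlib
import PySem

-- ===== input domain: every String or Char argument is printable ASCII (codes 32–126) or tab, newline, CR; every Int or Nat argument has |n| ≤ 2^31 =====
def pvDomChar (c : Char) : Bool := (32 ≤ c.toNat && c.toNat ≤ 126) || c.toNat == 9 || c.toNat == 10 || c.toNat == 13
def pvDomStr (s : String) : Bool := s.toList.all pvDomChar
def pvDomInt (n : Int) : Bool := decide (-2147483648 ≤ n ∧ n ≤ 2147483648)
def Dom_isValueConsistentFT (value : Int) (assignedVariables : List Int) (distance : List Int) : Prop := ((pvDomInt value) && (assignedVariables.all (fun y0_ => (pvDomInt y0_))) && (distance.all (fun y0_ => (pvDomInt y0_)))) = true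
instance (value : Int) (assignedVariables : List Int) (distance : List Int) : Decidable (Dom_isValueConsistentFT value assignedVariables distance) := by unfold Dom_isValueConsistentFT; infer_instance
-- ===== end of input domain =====

-- B replaces A's incremental seen-set with early returns by a sort-then-adjacent-scan
-- for duplicate distances plus one membership pass against a precomputed banned set
-- (set(distance) with 0 added); equal return values, no speed claim.

-- ===== PORT A =====
-- A's for-loop with its early 'return False, set()' : none = early return
def pvGoA (value : Int) (distance : List Int) : List Int → PySem.Set Int → Option (PySem.Set Int)
  | [], s => some s
  | m :: rest, s =>
    let newDistance := |value - m|
    if distance.contains newDistance || PySem.Set.contains s newDistance || newDistance == 0 then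
      none
    else
      pvGoA value distance rest (PySem.Set.add s newDistance)

def isValueConsistentFT (value : Int) (assignedVariables : List Int) (distance : List Int) : Bool × List Int :=
  match pvGoA value distance assignedVariables PySem.Set.empty with
  | none => (false, PySem.Set.empty)
  | some newSetValues =>
    if assignedVariables.length = 0 then
      if distance.contains value || PySem.Set.contains newSetValues value then
        (false, PySem.Set.empty)
      else
        (true, PySem.Set.add newSetValues value)
    else
      (true, newSetValues)

-- ===== PORT B =====
def isValueConsistentFT_alt (value : Int) (assignedVariables : List Int) (distance : List Int) : Bool × List Int :=
  if assignedVariables = [] then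
    if distance.contains value then (false, PySem.Set.empty)
    else (true, PySem.Set.ofList [value])
  else
    let banned := PySem.Set.add (PySem.Set.ofList distance) 0
    let ds := assignedVariables.map (fun m => |value - m|)
    if ds.any (fun d => PySem.Set.contains banned d) then (false, PySem.Set.empty)
    else
      let srt := PySem.List.sorted ds (fun x => x) false
      -- zip(srt, srt[1:]) : srt[1:] ported as srt.drop 1 (exact for the nonnegative literal start 1)
      if (srt.zip (srt.drop 1)).any (fun p => p.1 == p.2) then (false, PySem.Set.empty)
      else (true, PySem.Set.ofList ds)

-- ===== PRECONDITION & SPEC =====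
def Spec_isValueConsistentFT (value : Int) (assignedVariables : List Int) (distance : List Int) (out : Bool × List Int) : Prop := out = isValueConsistentFT_alt value assignedVariables distance
instance (value : Int) (assignedVariables : List Int) (distance : List Int) (out : Bool × List Int) : Decidable (Spec_isValueConsistentFT value assignedVariables distance out) := by unfold Spec_isValueConsistentFT; infer_instance

-- ===== CLAIM (what is proved, stated in full; the proofs are below) =====
def Claim_equal_isValueConsistentFT : Prop := ∀ (value : Int) (assignedVariables : List Int) (distance : List Int), Dom_isValueConsistentFT value assignedVariables distance → Spec_isValueConsistentFT value assignedVariables distance (isValueConsistentFT value assignedVariables distance)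

-- ===== LEMMAS AND PROOFS =====

-- A's loop, characterised: it aborts iff some distance is 0, clashes with `distance`,
-- or repeats (within ds or against the accumulator s); otherwise it returns s ++ ds.
lemma pvGoA_eq (value : Int) (distance : List Int) (av : List Int) (s : List Int)
    (hs : s.Nodup) :
    pvGoA value distance av s =
      (if (∃ d ∈ av.map (fun m => |value - m|), d ∈ distance ∨ d = 0) ∨
          ¬ (s ++ av.map (fun m => |value - m|)).Nodup then
        none
      else some (s ++ av.map (fun m => |value - m|))) := by
  induction av generalizing s with
  | nil => simp [pvGoA, hs]
  | cons m rest ih =>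
    simp only [pvGoA, List.map_cons]
    by_cases hc : (distance.contains (|value - m|) || PySem.Set.contains s (|value - m|) || (|value - m|) == 0) = true
    · rw [if_pos hc]
      rw [if_pos]
      simp only [Bool.or_eq_true, List.contains_eq_mem, decide_eq_true_eq, beq_iff_eq,
        PySem.Set.contains] at hc
      rcases hc with (h | h) | h
      · exact Or.inl ⟨|value - m|, by simp, Or.inl h⟩
      · right
        intro hn
        rw [show s ++ (|value - m|) :: rest.map (fun m => |value - m|)
              = (s ++ [|value - m|]) ++ rest.map (fun m => |value - m|) by simp] at hn
        have := hn.sublist (List.sublist_append_left _ _)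
        simp [List.nodup_append] at this
        exact this.2 _ h rfl
      · exact Or.inl ⟨|value - m|, by simp, Or.inr h⟩
    · rw [if_neg hc]
      simp only [Bool.or_eq_true, not_or, List.contains_eq_mem, decide_eq_true_eq,
        beq_iff_eq, PySem.Set.contains] at hc
      obtain ⟨⟨h1, h2⟩, h3⟩ := hc
      have hadd : PySem.Set.add s (|value - m|) = s ++ [|value - m|] := by
        simp [PySem.Set.add, PySem.Set.contains, List.contains_eq_mem, h2]
      rw [hadd, ih _ (by simp [List.nodup_append, hs]; exact fun a ha he => h2 (he ▸ ha))]
      have hassoc : (s ++ [|value - m|]) ++ rest.map (fun m => |value - m|)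
          = s ++ (|value - m|) :: rest.map (fun m => |value - m|) := by simp
      rw [hassoc]
      congr 1
      simp only [eq_iff_iff]
      constructor
      · rintro (⟨d, hd, h⟩ | h)
        · exact Or.inl ⟨d, by simp [hd], h⟩
        · exact Or.inr h
      · rintro (⟨d, hd, h⟩ | h)
        · simp only [List.mem_cons] at hd
          rcases hd with rfl | hd
          · rcases h with h | h
            · exact absurd h h1
            · exact absurd h h3
          · exact Or.inl ⟨d, hd, h⟩
        · exact Or.inr h

-- adjacent-pair scan on a ≤-sorted list detects exactly the duplicates
lemma adj_any_iff (l : List Int) (hp : l.Pairwise (· ≤ ·)) :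
    ((l.zip (l.drop 1)).any (fun p => p.1 == p.2)) = true ↔ ¬ l.Nodup := by
  induction l with
  | nil => simp
  | cons a t ih =>
    cases t with
    | nil => simp
    | cons b r =>
      have hp' : (b :: r).Pairwise (· ≤ ·) := hp.tail
      have hab : a ≤ b := (List.pairwise_cons.mp hp).1 b (by simp)
      simp only [List.drop_succ_cons, List.drop_zero, List.zip_cons_cons, List.any_cons,
        Bool.or_eq_true, beq_iff_eq]
      by_cases he : a = b
      · subst he
        constructor
        · intro _; simp
        · intro _; left; rfl
      · have ih' := ih hp'
        simp only [List.drop_succ_cons, List.drop_zero] at ih'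
        rw [ih']
        have hnm : a ∉ b :: r := by
          intro hmem
          rcases List.mem_cons.mp hmem with rfl | hmr
          · exact he rfl
          · have hbx : b ≤ a := (List.pairwise_cons.mp hp').1 a hmr
            exact he (le_antisymm hab hbx)
        constructor
        · rintro (h | h)
          · exact absurd h he
          · intro hn; exact h (List.nodup_cons.mp hn).2
        · intro h
          right
          intro hn
          exact h (List.nodup_cons.mpr ⟨hnm, hn⟩)

-- ===== VERDICT (by name: the statement is the Claim_ definition above) =====
theorem isValueConsistentFT_spec : Claim_equal_isValueConsistentFT := by
  intro value av distance _
  unfold Spec_isValueConsistentFT isValueConsistentFT isValueConsistentFT_alt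
  rw [show (PySem.Set.empty : PySem.Set Int) = ([] : List Int) from rfl]
  rw [pvGoA_eq value distance av [] (by simp)]
  cases av with
  | nil =>
    simp [PySem.Set.add, PySem.Set.contains, PySem.Set.ofList, List.contains_eq_mem]
  | cons a l =>
    set ds := (a :: l).map (fun m => |value - m|) with hds
    have hne : (a :: l) ≠ [] := by simp
    rw [if_neg hne]
    have hmem_banned : ∀ d : Int,
        PySem.Set.contains (PySem.Set.add (PySem.Set.ofList distance) 0) d = true ↔
          d ∈ distance ∨ d = 0 := by
      intro d
      simp [PySem.Set.contains, List.contains_eq_mem, PySem.Set.mem_add, PySem.Set.mem_ofList]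
    have hfirst : (ds.any fun d => PySem.Set.contains (PySem.Set.add (PySem.Set.ofList distance) 0) d) = true ↔
        (∃ d ∈ ds, d ∈ distance ∨ d = 0) := by
      simp only [List.any_eq_true]
      constructor
      · rintro ⟨d, hd, h⟩; exact ⟨d, hd, (hmem_banned d).mp h⟩
      · rintro ⟨d, hd, h⟩; exact ⟨d, hd, (hmem_banned d).mpr h⟩
    have hsorted := PySem.List.sorted_pairwise (xs := ds) (key := fun x => x)
    have hadj := adj_any_iff (PySem.List.sorted ds (fun x => x) false) hsorted
    have hnodup_iff : (PySem.List.sorted ds (fun x => x) false).Nodup ↔ ds.Nodup :=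
      (PySem.List.sorted_perm ds (fun x => x) false).nodup_iff
    by_cases h1 : ∃ d ∈ ds, d ∈ distance ∨ d = 0
    · rw [if_pos (Or.inl h1), if_pos (hfirst.mpr h1)]
    · rw [if_neg (fun hb => h1 (hfirst.mp hb))]
      by_cases h2 : ds.Nodup
      · rw [if_neg (by rw [List.nil_append]; exact fun hc => hc.elim h1 (fun hn => hn h2))]
        rw [if_neg (by rw [hadj, hnodup_iff]; exact fun hn => hn h2)]
        rw [List.nil_append, PySem.Set.ofList_eq_self_of_nodup _ h2]
        simp
      · rw [if_pos (Or.inr (by rw [List.nil_append]; exact h2))]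
        rw [if_pos (hadj.mpr (fun hn => h2 (hnodup_iff.mp hn)))]
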